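-- pv_equiv track=rewrite | github.com/MrBrantCode/unitest_baseline | mut_generate/mist_train_cf/cf_18490/solution.py | has_repeated_palindrome
-- ===== SOURCE A (Python) =====
-- def has_repeated_palindrome(s, m, k):
--     """
--     Checks if there exists a substring of length m that repeats at least k times
--     consecutively in the string s and is a palindrome.
--
--     Args:
--         s (str): The input string.
--         m (int): The length of the substring.
--         k (int): The number of consecutive repetitions.
--
--     Returns:
--         bool: True if a repeated palindrome substring exists, False otherwise.
--     """
--
--     # Check if m is less than the length of s and k is greater than 1
--     if m >= len(s) or k <= 1:
--         return False
--
--     # Iterate through all possible substrings of length m in the given string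
--     for i in range(len(s) - m + 1):
--         substring = s[i:i+m]
--
--         # Check if the substring is a palindrome
--         if substring == substring[::-1]:
--
--             # Check if the substring appears at least k times consecutively
--             consecutive_count = 0
--             for j in range(i, len(s), m):
--                 if s[j:j+m] == substring:
--                     consecutive_count += 1
--                 else:
--                     break
--             if consecutive_count >= k:
--                 return True
--
--     # If no substring meets the conditions, return False
--     return False
-- ===== SOURCE B (Python) =====
-- def has_repeated_palindrome(s, m, k):
--     n = len(s)
--     # a substring length must be positive; also need room and k >= 2
--     if m < 1 or m >= n or k <= 1:
--         return False
--     # i can only start k full blocks if i + m*k <= n; compare the whole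
--     # stretch against the block repeated k times instead of counting blocks
--     for i in range(n - m * k + 1):
--         block = s[i:i + m]
--         if block == block[::-1] and s[i:i + m * k] == block * k:
--             return True
--     return False
-- ===== Notes on version B (the rewrite author's own statement) =====
-- stated objective: faster
-- what changed: B drops A's inner consecutive-block counting loop entirely: it compares s[i:i+m*k] against the candidate block repeated k times, and only scans the starts i <= n-m*k that can fit k blocks (plus an explicit m >= 1 guard).
import Mathlib
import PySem

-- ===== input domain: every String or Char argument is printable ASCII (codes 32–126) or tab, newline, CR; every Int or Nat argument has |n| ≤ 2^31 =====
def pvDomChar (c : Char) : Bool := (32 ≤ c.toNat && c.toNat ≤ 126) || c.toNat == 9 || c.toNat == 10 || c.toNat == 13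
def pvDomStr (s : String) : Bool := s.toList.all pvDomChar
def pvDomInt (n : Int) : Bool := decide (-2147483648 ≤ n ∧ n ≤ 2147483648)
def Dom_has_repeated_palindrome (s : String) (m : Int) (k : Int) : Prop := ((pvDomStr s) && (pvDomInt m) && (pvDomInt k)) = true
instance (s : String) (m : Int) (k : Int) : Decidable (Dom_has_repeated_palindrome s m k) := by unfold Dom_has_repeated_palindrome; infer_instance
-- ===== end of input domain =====

-- B replaces A's inner block-counting loop (with break) by a single comparison of
-- s[i:i+m*k] against the block repeated k times, over the shorter start range [0, n-m*k].

-- ===== PORT A =====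
-- A's inner loop 'for j in range(i, len(s), m): if s[j:j+m]==substring: c+=1 else: break',
-- as structural recursion over the range list with the running count c
def pvCountA (cs : List Char) (sub : List Char) (m : Int) : List Int → Int → Int
  | [], c => c
  | j :: rest, c =>
      if PySem.List.slice cs (some j) (some (j + m)) = sub then
        pvCountA cs sub m rest (c + 1)
      else c

def has_repeated_palindrome (s : String) (m : Int) (k : Int) : Bool :=
  let cs := s.toList
  let n : Int := (cs.length : Int)     -- len(s) (= number of code points)
  if m ≥ n ∨ k ≤ 1 then false
  else
    -- 'for i in range(len(s)-m+1): … return True' = any over the range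
    (PySem.List.pyRange 0 (n - m + 1) 1).any fun i =>
      let substring := PySem.List.slice cs (some i) (some (i + m))
      -- substring[::-1] is substring.reverse (PySem.List.slice?_none_none_neg_one)
      if substring = substring.reverse then
        decide (k ≤ pvCountA cs substring m (PySem.List.pyRange i n m) 0)
      else false

-- ===== PORT B =====
def has_repeated_palindrome_alt (s : String) (m : Int) (k : Int) : Bool :=
  let cs := s.toList
  let n : Int := (cs.length : Int)
  if m < 1 ∨ m ≥ n ∨ k ≤ 1 then false
  else
    (PySem.List.pyRange 0 (n - m * k + 1) 1).any fun i =>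
      let block := PySem.List.slice cs (some i) (some (i + m))
      -- block == block[::-1] and s[i:i+m*k] == block * k
      decide (block = block.reverse) &&
        decide (PySem.List.slice cs (some i) (some (i + m * k)) = PySem.List.pyRepeat block k)

-- ===== PRECONDITION & SPEC =====
-- Pre_ excludes exactly the inputs on which A raises: m = 0 on a nonempty s with k > 1
-- makes A's inner 'range(i, len(s), 0)' raise ValueError (zero step).
def Pre_has_repeated_palindrome (s : String) (m : Int) (k : Int) : Prop :=
  m ≠ 0 ∨ s.toList.length = 0 ∨ k ≤ 1
instance (s : String) (m : Int) (k : Int) : Decidable (Pre_has_repeated_palindrome s m k) := by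
  unfold Pre_has_repeated_palindrome; infer_instance

def pvWitness_has_repeated_palindrome : String × Int × Int := ("abaaba", 3, 2)

def Spec_has_repeated_palindrome (s : String) (m : Int) (k : Int) (out : Bool) : Prop :=
  out = has_repeated_palindrome_alt s m k
instance (s : String) (m : Int) (k : Int) (out : Bool) : Decidable (Spec_has_repeated_palindrome s m k out) := by
  unfold Spec_has_repeated_palindrome; infer_instance

-- ===== CLAIM (what is proved, stated in full; the proofs are below) =====
def Claim_equal_has_repeated_palindrome : Prop := ∀ (s : String) (m : Int) (k : Int), Dom_has_repeated_palindrome s m k → Pre_has_repeated_palindrome s m k → Spec_has_repeated_palindrome s m k (has_repeated_palindrome s m k)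


-- ===== LEMMAS AND PROOFS =====

lemma pvCountA_shift (cs sub : List Char) (m : Int) (l : List Int) (c : Int) :
    pvCountA cs sub m l c = c + pvCountA cs sub m l 0 := by
  induction l generalizing c with
  | nil => simp [pvCountA]
  | cons j rest ih =>
      simp only [pvCountA]
      split
      · rw [ih (c + 1), ih (0 + 1)]; ring
      · simp

lemma pvCountA_ge (cs sub : List Char) (m : Int) (l : List Int) (c : Int) :
    c ≤ pvCountA cs sub m l c := by
  induction l generalizing c with
  | nil => simp [pvCountA]
  | cons j rest ih =>
      simp only [pvCountA]
      split
      · exact le_trans (by omega) (ih (c + 1))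
      · exact le_refl c

lemma pvCountA_le_length (cs sub : List Char) (m : Int) (l : List Int) (c : Int) :
    pvCountA cs sub m l c ≤ c + (l.length : Int) := by
  induction l generalizing c with
  | nil => simp [pvCountA]
  | cons j rest ih =>
      simp only [pvCountA, List.length_cons]
      split
      · have := ih (c + 1); push_cast at this ⊢; omega
      · push_cast; omega

lemma pv_pyRange_nil {a b s : Int} (hs : 0 < s) (h : b ≤ a) :
    PySem.List.pyRange a b s = [] := by
  rw [PySem.List.pyRange_of_pos a b hs]
  simp [show ¬ a < b by omega]

lemma pv_pyRange_cons {a b s : Int} (hs : 0 < s) (h : a < b) :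
    PySem.List.pyRange a b s = a :: PySem.List.pyRange (a + s) b s := by
  rw [PySem.List.pyRange_of_pos a b hs, PySem.List.pyRange_of_pos (a + s) b hs]
  have hdiv : (b - a + s - 1) / s = (b - a - 1) / s + 1 := by
    rw [show b - a + s - 1 = (b - a - 1) + 1 * s by ring,
        Int.add_mul_ediv_right _ _ (by omega : s ≠ 0)]
  have hq : 0 ≤ (b - a - 1) / s := Int.ediv_nonneg (by omega) (by omega)
  have htail : (if a + s < b then ((b - (a + s) + s - 1) / s).toNat else 0)
      = ((b - a - 1) / s).toNat := by
    split_ifs with h'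
    · rw [show b - (a + s) + s - 1 = b - a - 1 by ring]
    · have h0 : (b - a - 1) / s = 0 := Int.ediv_eq_zero_of_lt (by omega) (by omega)
      simp [h0]
  rw [if_pos h, hdiv, htail, show ((b - a - 1) / s + 1).toNat = ((b - a - 1) / s).toNat + 1 by omega,
      List.range_succ_eq_map, List.map_cons, List.map_map]
  congr 1
  · simp
  · apply List.map_congr_left
    intro x _
    simp only [Function.comp_apply, Nat.succ_eq_add_one]
    push_cast
    ring

lemma pv_slice_split (cs : List Char) {a b c : Int} (h0 : 0 ≤ a) (hab : a ≤ b) (hbc : b ≤ c) :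
    PySem.List.slice cs (some a) (some c)
      = PySem.List.slice cs (some a) (some b) ++ PySem.List.slice cs (some b) (some c) := by
  rw [PySem.List.slice_toNat cs h0 (by omega), PySem.List.slice_toNat cs h0 (by omega),
      PySem.List.slice_toNat cs (by omega) (by omega)]
  rw [show c.toNat - a.toNat = (b.toNat - a.toNat) + (c.toNat - b.toNat) by omega,
      List.take_add]
  congr 1
  rw [List.drop_drop, show a.toNat + (b.toNat - a.toNat) = b.toNat by omega]

def pvRep (sub : List Char) (t : Nat) : List Char := (List.replicate t sub).flatten

lemma pvRep_succ (sub : List Char) (t : Nat) : pvRep sub (t + 1) = sub ++ pvRep sub t := by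
  simp [pvRep, List.replicate_succ]

lemma pvRep_length (sub : List Char) (t : Nat) : (pvRep sub t).length = t * sub.length := by
  induction t with
  | zero => simp [pvRep]
  | succ t ih => rw [pvRep_succ, List.length_append, ih]; ring

lemma pyRepeat_eq_pvRep (sub : List Char) (k : Int) :
    PySem.List.pyRepeat sub k = pvRep sub k.toNat := rfl

lemma pv_cnt_iff (cs : List Char) (m : Int) (hm : 1 ≤ m) (sub : List Char)
    (hsub : sub.length = m.toNat) :
    ∀ (t : Nat) (j : Int), 0 ≤ j →
      (((t : Int) ≤ pvCountA cs sub m (PySem.List.pyRange j (cs.length : Int) m) 0)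
        ↔ PySem.List.slice cs (some j) (some (j + m * t)) = pvRep sub t) := by
  intro t
  induction t with
  | zero =>
      intro j hj
      constructor
      · intro _
        rw [show j + m * ((0 : Nat) : Int) = j by push_cast; ring,
            PySem.List.slice_toNat cs hj hj]
        simp [pvRep]
      · intro _
        have := pvCountA_ge cs sub m (PySem.List.pyRange j (cs.length : Int) m) 0
        push_cast
        omega
  | succ t ih =>
      intro j hj
      have hmt : (0 : Int) ≤ m * (t : Int) := mul_nonneg (by omega) (Int.natCast_nonneg t)
      have hcast : j + m * ((t + 1 : Nat) : Int) = (j + m) + m * (t : Int) := by push_cast; ring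
      by_cases hjn : j < (cs.length : Int)
      · rw [pv_pyRange_cons (by omega) hjn]
        by_cases hblk : PySem.List.slice cs (some j) (some (j + m)) = sub
        · have hcons : pvCountA cs sub m
              (j :: PySem.List.pyRange (j + m) (cs.length : Int) m) 0
              = 1 + pvCountA cs sub m (PySem.List.pyRange (j + m) (cs.length : Int) m) 0 := by
            simp only [pvCountA, if_pos hblk]
            rw [pvCountA_shift]
            omega
          rw [hcons, hcast, pvRep_succ,
              pv_slice_split cs hj (by omega : j ≤ j + m)
                (by omega : j + m ≤ (j + m) + m * (t : Int)),
              hblk]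
          have hih := ih (j + m) (by omega)
          constructor
          · intro hle
            rw [hih.mp (by push_cast at hle ⊢; omega)]
          · intro heq
            have h2 := List.append_cancel_left heq
            have := hih.mpr h2
            push_cast at this ⊢
            omega
        · simp only [pvCountA, if_neg hblk]
          constructor
          · intro h
            exfalso
            push_cast at h
            omega
          · intro heq
            exfalso
            apply hblk
            rw [hcast] at heq
            have h1 := congrArg (List.take m.toNat) heq
            rw [pvRep_succ, show m.toNat = sub.length from hsub.symm, List.take_left,
                show sub.length = m.toNat from hsub] at h1
            rw [PySem.List.slice_toNat cs hj (by omega : (0 : Int) ≤ (j + m) + m * (t : Int)),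
                List.take_take] at h1
            rw [PySem.List.slice_toNat cs hj (by omega : (0 : Int) ≤ j + m)]
            generalize hQ : m * (t : Int) = Q at h1 hmt
            rw [show min m.toNat (((j + m) + Q).toNat - j.toNat) = (j + m).toNat - j.toNat
              by omega] at h1
            exact h1
      · rw [pv_pyRange_nil (by omega) (by omega)]
        simp only [pvCountA]
        constructor
        · intro h
          exfalso
          push_cast at h
          omega
        · intro heq
          exfalso
          rw [hcast] at heq
          have hsl : PySem.List.slice cs (some j) (some ((j + m) + m * (t : Int))) = [] := by
            rw [PySem.List.slice_toNat cs hj (by omega : (0 : Int) ≤ (j + m) + m * (t : Int))]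
            rw [List.drop_eq_nil_of_le (by omega : cs.length ≤ j.toNat)]
            simp
          rw [hsl, pvRep_succ] at heq
          have := congrArg List.length heq
          simp only [List.length_nil, List.length_append] at this
          omega

lemma pv_rep_bound (cs : List Char) {m : Int} (hm : 1 ≤ m) {sub : List Char}
    (hsub : sub.length = m.toNat) {t : Nat} (ht : 1 ≤ t) {j : Int} (hj : 0 ≤ j)
    (h : PySem.List.slice cs (some j) (some (j + m * t)) = pvRep sub t) :
    j + m * t ≤ (cs.length : Int) := by
  have hmt : (0 : Int) ≤ m * (t : Int) := mul_nonneg (by omega) (Int.natCast_nonneg t)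
  have hlen := congrArg List.length h
  rw [PySem.List.slice_toNat cs hj (by omega), List.length_take, List.length_drop,
      pvRep_length, hsub] at hlen
  have hc : (m * (t : Int)).toNat = t * m.toNat := by
    have : m * (t : Int) = ((t * m.toNat : Nat) : Int) := by
      push_cast [Int.toNat_of_nonneg (by omega : (0 : Int) ≤ m)]
      ring
    omega
  have hQ1 : 1 ≤ t * m.toNat := Nat.one_le_iff_ne_zero.mpr
    (Nat.mul_ne_zero (by omega) (by omega))
  generalize hq : t * m.toNat = Q at hlen hc hQ1
  generalize hp : m * (t : Int) = P at hlen hc hmt ⊢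
  omega

-- length of a full in-range block
lemma pv_block_length (cs : List Char) {i m : Int} (hi : 0 ≤ i) (hm : 0 ≤ m)
    (hin : i + m ≤ (cs.length : Int)) :
    (PySem.List.slice cs (some i) (some (i + m))).length = m.toNat := by
  rw [PySem.List.slice_toNat cs hi (by omega), List.length_take, List.length_drop]
  omega

-- for m < 0 the inner range has at most one element
lemma pv_pyRange_neg_len {a b s : Int} (hs : s < 0) (ha : a - b ≤ -s) :
    ((PySem.List.pyRange a b s).length : Int) ≤ 1 := by
  have hlt : (a - b + -s - 1) / (-s) < 2 := by
    rw [Int.ediv_lt_iff_lt_mul (by omega : (0 : Int) < -s)]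
    omega
  simp only [PySem.List.pyRange]
  rw [if_neg (show ¬ s = 0 by omega), if_neg (show ¬ 0 < s by omega)]
  split_ifs with h
  · simp only [List.length_map, List.length_range]
    omega
  · simp

-- the test A performs for a given start i, as a Prop
lemma pvA_true_iff (cs : List Char) (m k i : Int) :
    ((if PySem.List.slice cs (some i) (some (i + m))
          = (PySem.List.slice cs (some i) (some (i + m))).reverse then
        decide (k ≤ pvCountA cs (PySem.List.slice cs (some i) (some (i + m))) m
          (PySem.List.pyRange i (cs.length : Int) m) 0)
      else false) = true)
    ↔ (PySem.List.slice cs (some i) (some (i + m))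
          = (PySem.List.slice cs (some i) (some (i + m))).reverse
        ∧ k ≤ pvCountA cs (PySem.List.slice cs (some i) (some (i + m))) m
            (PySem.List.pyRange i (cs.length : Int) m) 0) := by
  split_ifs with h
  · simp only [decide_eq_true_eq]
    exact ⟨fun hx => ⟨h, hx⟩, fun hx => hx.2⟩
  · constructor
    · intro hx
      exact absurd hx (by simp)
    · intro hx
      exact absurd hx.1 h

-- the test B performs for a given start i, as a Prop
lemma pvB_true_iff (cs : List Char) (m k i : Int) :
    ((decide (PySem.List.slice cs (some i) (some (i + m))
          = (PySem.List.slice cs (some i) (some (i + m))).reverse) &&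
        decide (PySem.List.slice cs (some i) (some (i + m * k))
          = PySem.List.pyRepeat (PySem.List.slice cs (some i) (some (i + m))) k)) = true)
    ↔ (PySem.List.slice cs (some i) (some (i + m))
          = (PySem.List.slice cs (some i) (some (i + m))).reverse
        ∧ PySem.List.slice cs (some i) (some (i + m * k))
          = PySem.List.pyRepeat (PySem.List.slice cs (some i) (some (i + m))) k) := by
  simp

-- with a negative block length every palindromic-block test of A fails (count ≤ 1 < k)
lemma pv_neg_case (cs : List Char) (m k : Int) (hm : m < 0) (hk : 1 < k) :
    ((PySem.List.pyRange 0 ((cs.length : Int) - m + 1) 1).any fun i =>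
      if PySem.List.slice cs (some i) (some (i + m))
          = (PySem.List.slice cs (some i) (some (i + m))).reverse then
        decide (k ≤ pvCountA cs (PySem.List.slice cs (some i) (some (i + m))) m
          (PySem.List.pyRange i (cs.length : Int) m) 0)
      else false) = false := by
  rw [List.any_eq_false]
  intro i hi hcontra
  have hi' := PySem.List.mem_pyRange_one.mp hi
  have h := (pvA_true_iff cs m k i).mp hcontra
  have hcnt := pvCountA_le_length cs (PySem.List.slice cs (some i) (some (i + m))) m
      (PySem.List.pyRange i (cs.length : Int) m) 0
  have hlen := pv_pyRange_neg_len (a := i) (b := (cs.length : Int)) (s := m) hm (by omega)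
  omega

-- main case 1 ≤ m < len, 2 ≤ k: A's scan equals B's scan
lemma pv_pos_case (cs : List Char) (m k : Int) (hm1 : 1 ≤ m)
    (_hmn : m < (cs.length : Int)) (hk2 : 2 ≤ k) :
    ((PySem.List.pyRange 0 ((cs.length : Int) - m + 1) 1).any fun i =>
      if PySem.List.slice cs (some i) (some (i + m))
          = (PySem.List.slice cs (some i) (some (i + m))).reverse then
        decide (k ≤ pvCountA cs (PySem.List.slice cs (some i) (some (i + m))) m
          (PySem.List.pyRange i (cs.length : Int) m) 0)
      else false)
    = ((PySem.List.pyRange 0 ((cs.length : Int) - m * k + 1) 1).any fun i =>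
        decide (PySem.List.slice cs (some i) (some (i + m))
            = (PySem.List.slice cs (some i) (some (i + m))).reverse) &&
          decide (PySem.List.slice cs (some i) (some (i + m * k))
            = PySem.List.pyRepeat (PySem.List.slice cs (some i) (some (i + m))) k)) := by
  have hkt : k = ((k.toNat : Nat) : Int) := by omega
  have hmk : m ≤ m * k := by nlinarith
  rw [Bool.eq_iff_iff]
  simp only [List.any_eq_true]
  constructor
  · rintro ⟨i, hi, hfi⟩
    have hi' := PySem.List.mem_pyRange_one.mp hi
    have hil : 0 ≤ i := hi'.1
    have hiub : i + m ≤ (cs.length : Int) := by omega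
    have hsub : (PySem.List.slice cs (some i) (some (i + m))).length = m.toNat :=
      pv_block_length cs hil (by omega) hiub
    obtain ⟨hpal, hge⟩ := (pvA_true_iff cs m k i).mp hfi
    have hcnt : ((k.toNat : Nat) : Int) ≤ pvCountA cs
        (PySem.List.slice cs (some i) (some (i + m))) m
        (PySem.List.pyRange i (cs.length : Int) m) 0 := by omega
    have hrep := (pv_cnt_iff cs m hm1 _ hsub k.toNat i hil).mp hcnt
    have hmked : i + m * k = i + m * ((k.toNat : Nat) : Int) := by rw [← hkt]
    have hbound : i + m * k ≤ (cs.length : Int) := by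
      rw [hmked]
      exact pv_rep_bound cs hm1 hsub (by omega) hil hrep
    refine ⟨i, ?_, ?_⟩
    · rw [PySem.List.mem_pyRange_one]
      omega
    · refine (pvB_true_iff cs m k i).mpr ⟨hpal, ?_⟩
      rw [pyRepeat_eq_pvRep, hmked]
      exact hrep
  · rintro ⟨i, hi, hfi⟩
    have hi' := PySem.List.mem_pyRange_one.mp hi
    have hil : 0 ≤ i := hi'.1
    have hmk2 : i + m * k ≤ (cs.length : Int) := by omega
    have hiub : i + m ≤ (cs.length : Int) := by omega
    have hsub : (PySem.List.slice cs (some i) (some (i + m))).length = m.toNat :=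
      pv_block_length cs hil (by omega) hiub
    obtain ⟨hpal, hrep⟩ := (pvB_true_iff cs m k i).mp hfi
    have hmked : i + m * k = i + m * ((k.toNat : Nat) : Int) := by rw [← hkt]
    rw [pyRepeat_eq_pvRep, hmked] at hrep
    have hcnt := (pv_cnt_iff cs m hm1 _ hsub k.toNat i hil).mpr hrep
    refine ⟨i, ?_, ?_⟩
    · rw [PySem.List.mem_pyRange_one]
      omega
    · exact (pvA_true_iff cs m k i).mpr ⟨hpal, by omega⟩

-- ===== VERDICT (by name: the statement is the Claim_ definition above) =====
theorem has_repeated_palindrome_spec : Claim_equal_has_repeated_palindrome := by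
  intro s m k _ hpre
  unfold Spec_has_repeated_palindrome has_repeated_palindrome has_repeated_palindrome_alt
  simp only []
  by_cases hg : m ≥ ((s.toList.length : Nat) : Int) ∨ k ≤ 1
  · rw [if_pos hg, if_pos (show m < 1 ∨ m ≥ ((s.toList.length : Nat) : Int) ∨ k ≤ 1 by tauto)]
  · rw [if_neg hg, not_or] at *
    obtain ⟨_hmn, hk⟩ := hg
    by_cases hm1 : m < 1
    · rw [if_pos (Or.inl hm1)]
      have hmneg : m < 0 := by rcases hpre with h | h | h <;> omega
      exact pv_neg_case s.toList m k hmneg (by omega)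
    · rw [if_neg (show ¬ (m < 1 ∨ m ≥ ((s.toList.length : Nat) : Int) ∨ k ≤ 1) from by
        intro hcon; rcases hcon with h | h | h <;> omega)]
      exact pv_pos_case s.toList m k (by omega) (by omega) (by omega)
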